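-- pv_equiv track=rewrite | github.com/daniel-reich/ubiquitous-fiesta | wbhjXmdbPSxCSE5hW_24.py | sigilize
-- ===== SOURCE A (Python) =====
-- def sigilize(desire):
--   unl1 = []
--   for x in list(desire)[::-1]:
--     if x not in unl1:
--       unl1.append(x)
--   l2 = ''
--   for x in unl1:
--     if x.capitalize() in 'QWRTYPSDFGHJKLZXCVBNM':
--       l2 += x.capitalize()
--   return l2[::-1]
-- ===== SOURCE B (Python) =====
-- def sigilize(desire):
--   # One forward pass with a last-occurrence index table; no reversals.
--   last = {}
--   for i, ch in enumerate(desire):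
--     last[ch] = i
--   out = []
--   for i, ch in enumerate(desire):
--     c = ch.capitalize()
--     if last[ch] == i and c in 'QWRTYPSDFGHJKLZXCVBNM':
--       out.append(c)
--   return ''.join(out)
-- ===== Notes on version B (the rewrite author's own statement) =====
-- stated objective: simpler
-- what changed: Replaces reverse + dedup-list-with-membership-scan + second reverse by a last-occurrence index dict built in one pass plus a single forward pass that keeps a char exactly at its last occurrence; no reversals and no growing dedup list.
import Mathlib
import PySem

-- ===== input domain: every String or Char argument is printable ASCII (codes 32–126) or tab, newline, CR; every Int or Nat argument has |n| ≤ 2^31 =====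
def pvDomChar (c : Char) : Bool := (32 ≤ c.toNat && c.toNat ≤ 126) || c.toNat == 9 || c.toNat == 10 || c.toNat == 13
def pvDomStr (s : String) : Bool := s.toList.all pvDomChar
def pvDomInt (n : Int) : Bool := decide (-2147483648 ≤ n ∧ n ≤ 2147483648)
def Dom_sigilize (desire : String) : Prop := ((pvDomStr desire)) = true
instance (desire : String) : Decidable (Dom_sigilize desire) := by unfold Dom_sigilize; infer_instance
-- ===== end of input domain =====

-- B replaces A's reverse + dedup-scan + reverse by a last-occurrence index table and one forward pass (simpler control flow, no reversals).

-- The consonant string literal, as a list of characters.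
def sigCons : List Char := "QWRTYPSDFGHJKLZXCVBNM".toList

-- str.capitalize() applied to a ONE-character string: exact on printable ASCII (uppercases a lowercase letter, leaves the rest).
def sigCap (c : Char) : Char := if 'a' ≤ c ∧ c ≤ 'z' then Char.ofNat (c.toNat - 32) else c

-- ===== PORT A =====
-- list(desire)[::-1] is ported as .reverse (PySem.List.slice?_none_none_neg_one); l2 += c as list append, l2[::-1] as .reverse.
def sigilize (desire : String) : String :=
  let unl1 := (desire.toList.reverse).foldl
    (fun acc x => if x ∈ acc then acc else acc ++ [x]) ([] : List Char)
  let l2 := unl1.foldl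
    (fun s x => if sigCap x ∈ sigCons then s ++ [sigCap x] else s) ([] : List Char)
  String.ofList l2.reverse

-- ===== PORT B =====
-- last[ch] never raises (every iterated ch is a key), so the lookup is ported as get? … = some i; ''.join of 1-char strings is String.ofList.
def sigilize_alt (desire : String) : String :=
  let cs := desire.toList
  let last := (PySem.List.enumerate cs 0).foldl
    (fun d p => d.insert p.2 p.1) (PySem.Dict.empty : PySem.Dict Char Int)
  String.ofList ((PySem.List.enumerate cs 0).foldl
    (fun out p => if last.get? p.2 = some p.1 ∧ sigCap p.2 ∈ sigCons then out ++ [sigCap p.2] else out)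
    ([] : List Char))

-- ===== PRECONDITION & SPEC =====
def Spec_sigilize (desire : String) (out : String) : Prop := out = sigilize_alt desire
instance (desire : String) (out : String) : Decidable (Spec_sigilize desire out) := by unfold Spec_sigilize; infer_instance

-- ===== CLAIM (what is proved, stated in full; the proofs are below) =====
def Claim_equal_sigilize : Prop := ∀ (desire : String), Dom_sigilize desire → Spec_sigilize desire (sigilize desire)

-- ===== LEMMAS AND PROOFS =====

-- the sublist of characters standing at their LAST occurrence, in order
def keepLast : List Char → List Char
  | [] => []
  | c :: t => if c ∈ t then keepLast t else c :: keepLast t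

-- index of the last occurrence of ch
def lastIdx? : List Char → Char → Option Nat
  | [], _ => none
  | c :: t, ch => match lastIdx? t ch with
    | some k => some (k + 1)
    | none => if c = ch then some 0 else none

theorem lastIdx?_eq_none_iff (t : List Char) (ch : Char) : lastIdx? t ch = none ↔ ch ∉ t := by
  induction t with
  | nil => simp [lastIdx?]
  | cons c t ih =>
    simp only [lastIdx?, List.mem_cons]
    cases h : lastIdx? t ch with
    | some k => simp [h] at ih ⊢; tauto
    | none =>
      simp [h] at ih ⊢
      constructor
      · intro hne; exact ⟨fun he => hne he.symm, ih⟩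
      · intro hx he; exact hx.1 he.symm

theorem dict_fold_get? (t : List Char) (n : Int) (d : PySem.Dict Char Int) (ch : Char) :
    (((PySem.List.enumerate t n).foldl (fun d p => d.insert p.2 p.1) d).get? ch)
      = match lastIdx? t ch with
        | some k => some (n + k)
        | none => d.get? ch := by
  induction t generalizing n d with
  | nil => simp [PySem.List.enumerate_nil, lastIdx?]
  | cons c t ih =>
    rw [PySem.List.enumerate_cons]
    simp only [List.foldl_cons]
    rw [ih]
    cases h : lastIdx? t ch with
    | some k =>
      simp only [lastIdx?, h]
      congr 1; push_cast; ring
    | none =>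
      simp only [lastIdx?, h]
      by_cases hc : c = ch
      · subst hc; simp [PySem.Dict.get?_insert_self]
      · rw [PySem.Dict.get?_insert]
        rw [if_neg (Ne.symm hc)]
        simp [hc]

theorem lastIdx?_eq_iff (cs : List Char) (i : Nat) (c : Char) (h : cs[i]? = some c) :
    lastIdx? cs c = some i ↔ c ∉ cs.drop (i + 1) := by
  induction cs generalizing i with
  | nil => simp at h
  | cons a t ih =>
    cases i with
    | zero =>
      simp only [List.getElem?_cons_zero, Option.some.injEq] at h
      subst h
      simp only [lastIdx?, List.drop_succ_cons, List.drop_zero]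
      cases hk : lastIdx? t a with
      | some k =>
        have hmem : a ∈ t := by
          by_contra hc
          rw [← lastIdx?_eq_none_iff t a] at hc
          simp [hk] at hc
        simp [hmem]
      | none =>
        have hmem : a ∉ t := (lastIdx?_eq_none_iff t a).1 hk
        simp [hmem]
    | succ j =>
      simp only [List.getElem?_cons_succ] at h
      simp only [lastIdx?, List.drop_succ_cons]
      rw [← ih j h]
      cases hk : lastIdx? t c with
      | some k => simp
      | none => exact absurd (List.mem_of_getElem? h) ((lastIdx?_eq_none_iff t c).1 hk)

-- A's dedup loop is set(xs) over the reversed list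
theorem dedup_fold_eq_update (l : List Char) (s : PySem.Set Char) :
    l.foldl (fun acc x => if x ∈ acc then acc else acc ++ [x]) s = PySem.Set.update s l := by
  induction l generalizing s with
  | nil => simp [PySem.Set.update]
  | cons x l ih =>
    rw [List.foldl_cons, PySem.Set.update_cons, ← ih]
    congr 1
    rw [PySem.Set.add_eq_ite]

theorem reverse_ofList_reverse (l : List Char) :
    (PySem.Set.ofList l.reverse).reverse = keepLast l := by
  induction l with
  | nil => simp [keepLast]
  | cons c t ih =>
    rw [List.reverse_cons, PySem.Set.ofList_append_singleton, PySem.Set.add_eq_ite, keepLast]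
    by_cases hc : c ∈ t
    · simp [PySem.Set.mem_ofList, hc, ih]
    · simp [PySem.Set.mem_ofList, hc, ih]

theorem filter_enumerate_eq_keepLast (cs : List Char) (t : List Char) (n : Nat)
    (ht : cs.drop n = t) :
    (((PySem.List.enumerate t (n : Int)).filter
        (fun pr => decide ((((PySem.List.enumerate cs 0).foldl (fun d p => d.insert p.2 p.1)
            (PySem.Dict.empty : PySem.Dict Char Int)).get? pr.2 = some pr.1)
          ∧ sigCap pr.2 ∈ sigCons))).map (fun pr => sigCap pr.2))
    = ((keepLast t).filter (fun c => decide (sigCap c ∈ sigCons))).map sigCap := by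
  induction t generalizing n with
  | nil => simp [PySem.List.enumerate_nil, keepLast]
  | cons c t' ih =>
    have hget : cs[n]? = some c := by
      have h0 : (cs.drop n)[0]? = cs[n + 0]? := List.getElem?_drop
      rw [ht] at h0
      simpa using h0.symm
    have hdrop : cs.drop (n + 1) = t' := by
      have h1 : cs.drop (n + 1) = (cs.drop n).drop 1 := by rw [List.drop_drop]
      rw [h1, ht]; rfl
    have hlook :
        (((PySem.List.enumerate cs 0).foldl (fun d p => d.insert p.2 p.1)
            (PySem.Dict.empty : PySem.Dict Char Int)).get? c = some (n : Int)) ↔ c ∉ t' := by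
      rw [dict_fold_get?]
      cases hk : lastIdx? cs c with
      | none =>
        exact absurd (List.mem_of_getElem? hget) ((lastIdx?_eq_none_iff cs c).1 hk)
      | some k =>
        simp only
        have hiff := lastIdx?_eq_iff cs n c hget
        rw [hk] at hiff
        rw [hdrop] at hiff
        constructor
        · intro he
          have : (k : Int) = (n : Int) := by simpa using he
          have : k = n := by exact_mod_cast this
          exact hiff.1 (by rw [this])
        · intro hm
          have : some k = some n := hiff.2 hm
          simp at this
          simp [this]
    rw [PySem.List.enumerate_cons, List.filter_cons]
    have hn1 : (n : Int) + 1 = ((n + 1 : Nat) : Int) := by push_cast; ring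
    by_cases hmem : c ∈ t'
    · rw [if_neg (by simp only [decide_eq_true_eq]; intro hc; exact (hlook.1 hc.1) hmem)]
      rw [hn1, ih (n + 1) hdrop]
      simp [keepLast, hmem]
    · by_cases hp : sigCap c ∈ sigCons
      · rw [if_pos (by simp only [decide_eq_true_eq]; exact ⟨hlook.2 hmem, hp⟩)]
        rw [List.map_cons, hn1, ih (n + 1) hdrop]
        simp [keepLast, hmem, hp]
      · rw [if_neg (by simp only [decide_eq_true_eq]; intro hc; exact hp hc.2)]
        rw [hn1, ih (n + 1) hdrop]
        simp [keepLast, hmem, hp]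

-- ===== VERDICT (by name: the statement is the Claim_ definition above) =====
theorem sigilize_spec : Claim_equal_sigilize := by
  intro desire _
  simp only [Spec_sigilize, sigilize, sigilize_alt]
  rw [PySem.List.foldl_append_ite (fun x => sigCap x ∈ sigCons) sigCap]
  rw [PySem.List.foldl_append_ite
    (fun pr : Int × Char =>
      (((PySem.List.enumerate desire.toList 0).foldl (fun d p => d.insert p.2 p.1)
          (PySem.Dict.empty : PySem.Dict Char Int)).get? pr.2 = some pr.1)
        ∧ sigCap pr.2 ∈ sigCons)
    (fun pr => sigCap pr.2)]
  rw [dedup_fold_eq_update, PySem.Set.update_nil_left]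
  congr 1
  rw [List.nil_append, List.nil_append, ← List.map_reverse, ← List.filter_reverse,
    reverse_ofList_reverse]
  have := filter_enumerate_eq_keepLast desire.toList desire.toList 0 (by simp)
  simpa using this.symm
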